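-- pv_equiv track=rewrite | github.com/Hemanthsure123/driver_suer_uber_clone | ml-service/main.py | count_blinks
-- ===== SOURCE A (Python) =====
-- def count_blinks(states):
--     blinks = 0
--     closed_frames = 0
--
--     for s in states:
--         if s == 0:
--             closed_frames += 1
--         else:
--             if 1 <= closed_frames <= 3:
--                 blinks += 1
--             closed_frames = 0
--
--     return blinks
-- ===== SOURCE B (Python) =====
-- def count_blinks(states):
--     # Run-length decomposition: build the list of (closed?, length) runs
--     # (most recent run first), then count the closed runs of length <= 3
--     # that are not the trailing run (i.e. were terminated by an open frame).
--     runs = []  # most recent run at runs[0]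
--     for s in states:
--         closed = (s == 0)
--         if runs and runs[0][0] == closed:
--             runs[0] = (closed, runs[0][1] + 1)
--         else:
--             runs.insert(0, (closed, 1))
--     # every run has length >= 1, so "1 <= length" is automatic
--     return sum(1 for (c, l) in runs[1:] if c and l <= 3)
-- ===== Notes on version B (the rewrite author's own statement) =====
-- stated objective: alternative
-- what changed: Replaces the running closed-frame counter with a run-length decomposition: B first builds the list of (closed, length) runs and then counts closed non-trailing runs of length at most 3.
import Mathlib
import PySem

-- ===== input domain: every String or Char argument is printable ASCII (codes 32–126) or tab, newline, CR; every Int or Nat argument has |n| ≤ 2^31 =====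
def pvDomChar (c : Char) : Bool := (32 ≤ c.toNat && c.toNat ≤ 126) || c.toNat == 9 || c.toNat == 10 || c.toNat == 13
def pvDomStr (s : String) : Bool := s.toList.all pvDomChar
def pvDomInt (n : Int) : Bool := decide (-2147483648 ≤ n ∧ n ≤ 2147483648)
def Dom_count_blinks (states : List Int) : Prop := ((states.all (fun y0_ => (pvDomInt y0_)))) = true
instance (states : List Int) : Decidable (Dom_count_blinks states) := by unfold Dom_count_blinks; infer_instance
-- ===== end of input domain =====

-- B replaces A's running closed-frame counter by a run-length decomposition (alternative; same cost).

-- ===== PORT A =====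
-- A's loop state: (blinks, closed_frames)
def pvAStep (st : Int × Int) (s : Int) : Int × Int :=
  if s == 0 then (st.1, st.2 + 1)
  else (if 1 ≤ st.2 ∧ st.2 ≤ 3 then st.1 + 1 else st.1, 0)

def count_blinks (states : List Int) : Int :=
  (states.foldl pvAStep (0, 0)).1

-- ===== PORT B =====
-- B's run builder: runs of (closed?, length), most recent run first
def pvStep (runs : List (Bool × Int)) (s : Int) : List (Bool × Int) :=
  let closed := s == 0
  match runs with
  | [] => [(closed, 1)]
  | (c, l) :: rest =>
      if c == closed then (c, l + 1) :: rest else (closed, 1) :: (c, l) :: rest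

def count_blinks_alt (states : List Int) : Int :=
  match states.foldl pvStep [] with
  | [] => 0
  | _ :: rest => ((rest.filter (fun p => p.1 && decide (p.2 ≤ 3))).length : Int)

-- ===== PRECONDITION & SPEC =====
def Spec_count_blinks (states : List Int) (out : Int) : Prop := out = count_blinks_alt states
instance (states : List Int) (out : Int) : Decidable (Spec_count_blinks states out) := by unfold Spec_count_blinks; infer_instance

-- ===== CLAIM (what is proved, stated in full; the proofs are below) =====
def Claim_equal_count_blinks : Prop := ∀ (states : List Int), Dom_count_blinks states → Spec_count_blinks states (count_blinks states)

-- ===== LEMMAS AND PROOFS =====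

-- blink count read off a run list (ignoring the trailing run)
def pvCount (runs : List (Bool × Int)) : Int :=
  match runs with
  | [] => 0
  | _ :: rest => ((rest.filter (fun p => p.1 && decide (p.2 ≤ 3))).length : Int)

-- length of the trailing closed run (A's closed_frames)
def pvTail : List (Bool × Int) → Int
  | (true, l) :: _ => l
  | _ => 0

def pvWF (runs : List (Bool × Int)) : Prop := ∀ p ∈ runs, 1 ≤ p.2

theorem pvStep_wf (runs : List (Bool × Int)) (s : Int) (h : pvWF runs) :
    pvWF (pvStep runs s) := by
  intro p hp
  cases runs with
  | nil =>
      simp [pvStep] at hp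
      simp [hp]
  | cons hd tl =>
      obtain ⟨c, l⟩ := hd
      have hl : 1 ≤ l := h (c, l) (by simp)
      by_cases hc : (c == (s == 0)) = true
      · simp [pvStep, hc] at hp
        rcases hp with rfl | hp
        · simp; omega
        · exact h p (by simp [hp])
      · simp [pvStep, hc] at hp
        rcases hp with rfl | rfl | hp
        · simp
        · exact hl
        · exact h p (by simp [hp])

theorem pvStep_sim (runs : List (Bool × Int)) (s : Int) (h : pvWF runs) :
    pvAStep (pvCount runs, pvTail runs) s = (pvCount (pvStep runs s), pvTail (pvStep runs s)) := by
  unfold pvAStep pvStep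
  by_cases hs : s = 0
  · cases runs with
    | nil => simp [hs, pvCount, pvTail]
    | cons hd tl =>
        obtain ⟨c, l⟩ := hd
        cases c <;> simp [hs, pvCount, pvTail]
  · cases runs with
    | nil => simp [hs, pvCount, pvTail]
    | cons hd tl =>
        obtain ⟨c, l⟩ := hd
        have hl : 1 ≤ l := h (c, l) (by simp)
        cases c
        · simp [hs, pvCount, pvTail]
        · simp [hs, pvCount, pvTail]
          by_cases h3 : l ≤ 3 <;> simp [h3, hl] <;> omega

theorem pvFold_sim (xs : List Int) : ∀ (runs : List (Bool × Int)), pvWF runs →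
    xs.foldl pvAStep (pvCount runs, pvTail runs)
      = (pvCount (xs.foldl pvStep runs), pvTail (xs.foldl pvStep runs)) := by
  induction xs with
  | nil => intro runs _; simp
  | cons x xs ih =>
      intro runs h
      simp only [List.foldl_cons]
      rw [pvStep_sim runs x h]
      exact ih (pvStep runs x) (pvStep_wf runs x h)

-- ===== VERDICT (by name: the statement is the Claim_ definition above) =====
theorem count_blinks_spec : Claim_equal_count_blinks := by
  intro states _
  unfold Spec_count_blinks count_blinks count_blinks_alt
  have h0 : pvWF ([] : List (Bool × Int)) := by intro p hp; simp at hp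
  have h := pvFold_sim states [] h0
  simp only [pvCount, pvTail] at h
  rw [h]
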